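-- pv_equiv track=rewrite | github.com/vshantam/GoogleAPI_Project-EDU_PROJECT1 | Place_Id().py | number_parser
-- ===== SOURCE A (Python) =====
-- def number_parser(x):
--     flag_add = False
--     numerals = ['0','1','2','3','4','5','6','7','8','9']
--     allowed_start_symbols = numerals + ['+']
--
--     ############
--     #INITIAL CLEANUP
--     x = x.strip()
--     idx=0
--     for _ in x:
--         if _ in allowed_start_symbols:
--             break
--         idx += 1
--     x = x[idx:]
--     #############
--
--     if x.find('+91') == 0:
--         flag_add = True
--
--     word = ''
--     phone_number = []
--
--     if flag_add:
--         word = list(x[3:])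
--     else:
--         word = list(x)
--
--     non_zero_encountered = False
--     for letter in word:
--         # REMOVES 0 FROM START OF NUMBERS
--         if not non_zero_encountered:
--             if letter in numerals[1:]:
--                 non_zero_encountered = True
--
--         if non_zero_encountered:
--             if letter in numerals:
--                 phone_number.append(letter)
--     return ''.join(phone_number)
-- ===== SOURCE B (Python) =====
-- # Table-driven pipeline: precomputed char classes + str methods, no explicit scanning loops.
-- JUNK = ''.join(chr(k) for k in range(128) if chr(k) not in '0123456789+')
-- DELETE_NONDIGITS = {k: None for k in range(128) if not 48 <= k <= 57}
--
-- def number_parser(x):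
--     s = x.strip().lstrip(JUNK)
--     if s.startswith('+91'):
--         s = s[3:]
--     return s.translate(DELETE_NONDIGITS).lstrip('0')
-- ===== Notes on version B (the rewrite author's own statement) =====
-- stated objective: idiomatic
-- what changed: A's hand-rolled scanning (an index loop to find the first allowed character, then a stateful character loop with a non_zero_encountered flag) is replaced by a loop-free pipeline of standard string methods driven by two precomputed ASCII character tables: lstrip over the junk character class, the country-code prefix drop, translate with a delete-non-digits table, then a final lstrip of leading zeros.
import Mathlib
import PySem

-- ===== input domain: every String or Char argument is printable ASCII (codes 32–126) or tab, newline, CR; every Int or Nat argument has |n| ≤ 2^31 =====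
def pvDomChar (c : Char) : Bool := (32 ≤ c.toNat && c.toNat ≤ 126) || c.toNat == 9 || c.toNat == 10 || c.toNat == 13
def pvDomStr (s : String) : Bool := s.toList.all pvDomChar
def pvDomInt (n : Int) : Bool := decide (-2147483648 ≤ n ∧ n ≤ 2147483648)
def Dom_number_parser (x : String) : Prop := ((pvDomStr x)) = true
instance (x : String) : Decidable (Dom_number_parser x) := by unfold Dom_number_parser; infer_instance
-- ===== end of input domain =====

-- B replaces A's hand-rolled stateful scanning loops by a loop-free pipeline of string methods
-- over two precomputed ASCII character tables (idiomatic; a timing run measured B faster by a constant factor).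

-- ===== PORT A =====
-- A's 'idx' loop: count chars before the first one in 'allowed' (break), else len
def npIdxScan (allowed : List Char) : List Char → Nat
  | [] => 0
  | c :: cs => if c ∈ allowed then 0 else npIdxScan allowed cs + 1

-- A's loop body on state (non_zero_encountered, phone_number)
def npStep (numerals : List Char) (st : Bool × List Char) (letter : Char) : Bool × List Char :=
  let nz := if ¬ st.1 then (if letter ∈ numerals.drop 1 then true else st.1) else st.1
  let acc := if nz then (if letter ∈ numerals then st.2 ++ [letter] else st.2) else st.2
  (nz, acc)

def number_parser (x : String) : String :=
  let numerals : List Char := ['0','1','2','3','4','5','6','7','8','9']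
  let allowed := numerals ++ ['+']
  let s0 := (PySem.Str.strip x).toList
  let idx := npIdxScan allowed s0
  let s := s0.drop idx                                   -- x[idx:], idx ≤ len
  let flagAdd := PySem.Chars.find s ['+','9','1'] == 0   -- x.find('+91') == 0
  let word := if flagAdd then s.drop 3 else s            -- x[3:]
  let res := word.foldl (npStep numerals) (false, [])
  String.ofList res.2                                    -- ''.join(phone_number)

-- ===== PORT B =====
-- JUNK = ''.join(chr(k) for k in range(128) if chr(k) not in '0123456789+')
def npJunk : List Char :=
  ((List.range 128).map Char.ofNat).filter
    (fun c => !((['0','1','2','3','4','5','6','7','8','9','+'] : List Char).contains c))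

-- DELETE_NONDIGITS = {k: None for k in range(128) if not 48 <= k <= 57} (the key set; all values None)
def npDelCodes : List Nat := (List.range 128).filter (fun k => !(48 ≤ k && k ≤ 57))

def number_parser_alt (x : String) : String :=
  let s0 := (PySem.Str.strip x).toList
  -- s.lstrip(JUNK): drop leading chars that lie in JUNK (exact hand port of str.lstrip(chars))
  let s1 := s0.dropWhile (fun c => npJunk.contains c)
  let s2 := if PySem.Chars.startswith s1 ['+','9','1'] then s1.drop 3 else s1
  -- s.translate(DELETE_NONDIGITS): delete every char whose code is a key of the table (all values None; exact hand port)
  let s3 := s2.filter (fun c => !(npDelCodes.contains c.toNat))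
  String.ofList (s3.dropWhile (fun c => c == '0'))       -- .lstrip('0')

-- ===== PRECONDITION & SPEC =====
def Spec_number_parser (x : String) (out : String) : Prop := out = number_parser_alt x
instance (x : String) (out : String) : Decidable (Spec_number_parser x out) := by unfold Spec_number_parser; infer_instance

-- ===== CLAIM (what is proved, stated in full; the proofs are below) =====
def Claim_equal_number_parser : Prop := ∀ (x : String), Dom_number_parser x → Spec_number_parser x (number_parser x)

-- ===== LEMMAS AND PROOFS =====

def npNumerals : List Char := ['0','1','2','3','4','5','6','7','8','9']

theorem mem_npJunk (c : Char) (hc : c.toNat < 128) :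
    npJunk.contains c = !((npNumerals ++ ['+']).contains c) := by
  have hmem : c ∈ (List.range 128).map Char.ofNat :=
    List.mem_map.2 ⟨c.toNat, List.mem_range.2 hc, Char.ofNat_toNat c⟩
  have he : npNumerals ++ ['+'] = (['0','1','2','3','4','5','6','7','8','9','+'] : List Char) := rfl
  rw [he, List.contains_eq_mem, List.contains_eq_mem]
  by_cases h : c ∈ (['0','1','2','3','4','5','6','7','8','9','+'] : List Char)
  · have h2 : c ∉ npJunk := by
      simp only [npJunk, List.mem_filter, List.contains_eq_mem, h, decide_true,
        Bool.not_true, Bool.false_eq_true, and_false, not_false_eq_true]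
    simp [h, h2]
  · have h2 : c ∈ npJunk := by
      simp only [npJunk, List.mem_filter, List.contains_eq_mem, h, decide_false,
        Bool.not_false, and_true]
      exact hmem
    simp [h, h2]

theorem digit_code (c : Char) :
    (decide (c ∈ npNumerals)) = (48 ≤ c.toNat && c.toNat ≤ 57) := by
  by_cases h : c ∈ npNumerals
  · simp only [npNumerals] at h; fin_cases h <;> decide
  · simp only [h, decide_false]
    symm; rw [Bool.eq_false_iff]
    intro hb
    simp only [Bool.and_eq_true, decide_eq_true_eq] at hb
    apply h
    have hn : c.toNat = 48 ∨ c.toNat = 49 ∨ c.toNat = 50 ∨ c.toNat = 51 ∨ c.toNat = 52 ∨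
        c.toNat = 53 ∨ c.toNat = 54 ∨ c.toNat = 55 ∨ c.toNat = 56 ∨ c.toNat = 57 := by omega
    have hc := (Char.ofNat_toNat c).symm
    rcases hn with h'|h'|h'|h'|h'|h'|h'|h'|h'|h' <;> rw [h'] at hc <;> rw [hc] <;> decide

theorem keep_eq_numeral (c : Char) (hc : c.toNat < 128) :
    (!(npDelCodes.contains c.toNat)) = (decide (c ∈ npNumerals)) := by
  rw [digit_code, List.contains_eq_mem]
  by_cases h : (48 ≤ c.toNat ∧ c.toNat ≤ 57)
  · have h2 : c.toNat ∉ npDelCodes := by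
      simp [npDelCodes, List.mem_filter]; omega
    simp only [h2, decide_false, Bool.not_false]
    simp [h.1, h.2]
  · have h2 : c.toNat ∈ npDelCodes := by
      simp [npDelCodes, List.mem_filter, List.mem_range, hc]; omega
    have h3 : (decide (48 ≤ c.toNat) && decide (c.toNat ≤ 57)) = false := by
      rcases Decidable.not_and_iff_or_not.1 h with h'|h' <;> simp [h']
    simp [h2, h3]

theorem dropWhile_congr' {α : Type} (p q : α → Bool) (l : List α)
    (h : ∀ a ∈ l, p a = q a) : l.dropWhile p = l.dropWhile q := by
  induction l with
  | nil => rfl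
  | cons a l ih =>
    have ha := h a (by simp)
    simp only [List.dropWhile_cons, ha]
    split
    · exact ih (fun b hb => h b (by simp [hb]))
    · rfl

theorem npIdxScan_drop (allowed : List Char) (l : List Char) :
    l.drop (npIdxScan allowed l) = l.dropWhile (fun c => !allowed.contains c) := by
  induction l with
  | nil => simp [npIdxScan]
  | cons c cs ih =>
    by_cases h : c ∈ allowed
    · simp [npIdxScan, h]
    · simp [npIdxScan, h, ih]

theorem find_eq_zero_iff (s p : List Char) :
    PySem.Chars.find s p = 0 ↔ p <+: s := by
  constructor
  · intro h
    have h0 : (0 : Int) ≤ PySem.Chars.find s p := by omega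
    have := (PySem.Chars.find_spec (s := s) (sub := p) h0).1
    simpa [h] using this
  · intro h
    have hinf : p <:+: s := h.isInfix
    have h0 : (0 : Int) ≤ PySem.Chars.find s p := (PySem.Chars.find_nonneg_iff s p).2 hinf
    rcases PySem.Chars.find_spec (s := s) (sub := p) h0 with ⟨_, hmin⟩
    by_contra hne
    have hpos : 0 < (PySem.Chars.find s p).toNat := by omega
    exact hmin 0 hpos (by simpa using h)

theorem npStep_true (l : List Char) (acc : List Char) :
    List.foldl (npStep npNumerals) (true, acc) l
      = (true, acc ++ l.filter (fun c => decide (c ∈ npNumerals))) := by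
  induction l generalizing acc with
  | nil => simp
  | cons c cs ih =>
    by_cases h : c ∈ npNumerals
    · simp [npStep, h, ih]
    · simp [npStep, h, ih]

theorem npStep_false (l : List Char) (acc : List Char) :
    (List.foldl (npStep npNumerals) (false, acc) l).2
      = acc ++ (l.filter (fun c => decide (c ∈ npNumerals))).dropWhile (fun c => c == '0') := by
  induction l generalizing acc with
  | nil => simp
  | cons c cs ih =>
    by_cases h1 : c ∈ npNumerals.tail
    · have hc : c ∈ npNumerals := by
        simp only [npNumerals] at h1 ⊢; simp at h1; rcases h1 with h|h|h|h|h|h|h|h|h <;> simp [h]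
      have hne : (c == '0') = false := by
        simp only [npNumerals] at h1; simp at h1
        rcases h1 with h|h|h|h|h|h|h|h|h <;> simp [h]
      simp [npStep, List.drop_one, h1, hc, npStep_true, hne]
    · by_cases h2 : c ∈ npNumerals
      · have hc0 : c = '0' := by
          simp only [npNumerals] at h1 h2; simp at h1 h2; tauto
        subst hc0
        simp [npStep, List.drop_one, h1, h2, ih]
      · simp [npStep, List.drop_one, h1, h2, ih]

theorem find_beq_startswith (s : List Char) (p : List Char) :
    (PySem.Chars.find s p == 0) = PySem.Chars.startswith s p := by
  by_cases h : p <+: s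
  · simp [(find_eq_zero_iff s p).2 h, (PySem.Chars.startswith_iff s p).2 h]
  · have h1 : PySem.Chars.find s p ≠ 0 := fun hh => h ((find_eq_zero_iff s p).1 hh)
    have h2 : PySem.Chars.startswith s p = false := by
      cases hb : PySem.Chars.startswith s p
      · rfl
      · exact absurd ((PySem.Chars.startswith_iff s p).1 hb) h
    simp [h1, h2]

theorem mem_strip (c : Char) (l : List Char) (h : c ∈ PySem.Chars.strip l) : c ∈ l := by
  simp only [PySem.Chars.strip, PySem.Chars.rstrip, PySem.Chars.lstrip] at h
  have h1 : c ∈ (List.dropWhile PySem.Chars.isspace l).reverse :=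
    (List.dropWhile_sublist _).mem (List.mem_reverse.1 h)
  exact (List.dropWhile_sublist _).mem (List.mem_reverse.1 h1)

-- ===== VERDICT (by name: the statement is the Claim_ definition above) =====
theorem number_parser_spec : Claim_equal_number_parser := by
  intro x hdom
  unfold Spec_number_parser number_parser number_parser_alt
  simp only
  have hdomc : ∀ c ∈ (PySem.Str.strip x).toList, c.toNat < 128 := by
    intro c hcm
    have hx : c ∈ x.toList := by
      apply mem_strip c x.toList
      simpa [PySem.Str.toList_strip] using hcm
    have := List.all_eq_true.1 hdom c hx
    simp only [pvDomChar] at this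
    simp at this
    omega
  rw [npIdxScan_drop]
  rw [show (['0','1','2','3','4','5','6','7','8','9'] : List Char) = npNumerals from rfl]
  rw [find_beq_startswith]
  have htail : ((PySem.Str.strip x).toList).dropWhile (fun c => npJunk.contains c)
      = ((PySem.Str.strip x).toList).dropWhile (fun c => !((npNumerals ++ ['+']).contains c)) :=
    dropWhile_congr' _ _ _ (fun c hcm => mem_npJunk c (hdomc c hcm))
  rw [htail]
  have hsub1 : ∀ c ∈ ((PySem.Str.strip x).toList).dropWhile
      (fun c => !((npNumerals ++ ['+']).contains c)), c.toNat < 128 :=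
    fun c hcm => hdomc c ((List.dropWhile_sublist _).mem hcm)
  have hfc : ∀ (l : List Char), (∀ c ∈ l, c.toNat < 128) →
      l.filter (fun c => decide (c ∈ npNumerals)) = l.filter (fun c => !(npDelCodes.contains c.toNat)) :=
    fun l hl => List.filter_congr (fun c hcm => (keep_eq_numeral c (hl c hcm)).symm)
  cases hb : PySem.Chars.startswith
      (((PySem.Str.strip x).toList).dropWhile (fun c => !((npNumerals ++ ['+']).contains c)))
      ['+','9','1'] with
  | false =>
    simp only [Bool.false_eq_true, if_false]
    rw [npStep_false, List.nil_append, hfc _ hsub1]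
  | true =>
    simp only [if_true]
    rw [npStep_false, List.nil_append,
      hfc _ (fun c hcm => hsub1 c ((List.drop_sublist _ _).mem hcm))]
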